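-- pv_equiv track=rewrite | github.com/IgrMd/yandex-algos-training | Тренировки по алгоритмам 5.0/Лекция 3. Множества и словари/C.py | min_count_to_delete
-- ===== SOURCE A (Python) =====
-- from collections import defaultdict
--
-- def min_count_to_delete(n, nums):
--     counts = defaultdict(int)
--     for num in nums:
--         counts[num] += 1
--     ans = 0
--     for num, count in counts.items():
--         if num + 1 in counts:
--             ans = max(ans, counts[num + 1] + count)
--         else:
--             ans = max(ans, count)
--     return n - ans
-- ===== SOURCE B (Python) =====
-- def min_count_to_delete(n, nums):
--     best = 0
--     cur = None
--     cur_run = 0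
--     prev_run = 0
--     for x in sorted(nums):
--         if x == cur:
--             cur_run += 1
--         else:
--             prev_run = cur_run if cur is not None and x == cur + 1 else 0
--             cur = x
--             cur_run = 1
--         best = max(best, cur_run + prev_run)
--     return n - best
-- ===== Notes on version B (the rewrite author's own statement) =====
-- stated objective: alternative
-- what changed: B drops A's hash-count table and v+1 membership probes entirely: it sorts the whole multiset and makes one run-length streaming pass, keeping only the current run, the previous adjacent run and the best sum seen; correct because max over v of count(v)+count(v+1) equals max over runs of run+previous-adjacent-run.
import Mathlib
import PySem

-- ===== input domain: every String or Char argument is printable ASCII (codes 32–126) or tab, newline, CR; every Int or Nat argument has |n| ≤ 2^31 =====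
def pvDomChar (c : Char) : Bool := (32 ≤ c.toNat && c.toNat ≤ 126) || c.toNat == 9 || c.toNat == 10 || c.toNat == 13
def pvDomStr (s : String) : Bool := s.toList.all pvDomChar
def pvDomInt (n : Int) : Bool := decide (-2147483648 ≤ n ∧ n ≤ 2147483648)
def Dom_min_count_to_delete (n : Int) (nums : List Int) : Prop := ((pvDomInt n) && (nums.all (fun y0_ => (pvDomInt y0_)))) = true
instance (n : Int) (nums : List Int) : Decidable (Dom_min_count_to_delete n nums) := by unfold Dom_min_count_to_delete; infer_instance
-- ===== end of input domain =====

-- B drops A's hash-count table and v+1 membership probes: it sorts the whole multiset and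
-- makes one run-length streaming pass (current run, previous adjacent run, best); alternative
-- decomposition, not claimed faster.

-- ===== PORT A =====
def min_count_to_delete (n : Int) (nums : List Int) : Int :=
  let counts := nums.foldl (fun d num => d.modify num 0 (· + 1)) (PySem.Dict.empty : PySem.Dict Int Int)
  let ans := counts.items.foldl
    (fun ans p =>
      if counts.contains (p.1 + 1) then max ans (counts.getD (p.1 + 1) 0 + p.2)
      else max ans p.2) 0
  n - ans

-- ===== PORT B =====
-- state = (best, cur, cur_run, prev_run); one iteration of B's for-loop body
def bStep (st : Int × Option Int × Int × Int) (x : Int) : Int × Option Int × Int × Int :=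
  let best := st.1
  let cur := st.2.1
  let cur_run := st.2.2.1
  let prev_run := st.2.2.2
  if cur = some x then
    (max best (cur_run + 1 + prev_run), cur, cur_run + 1, prev_run)
  else
    let prev_run' := if cur = some (x - 1) then cur_run else 0
    (max best (1 + prev_run'), some x, 1, prev_run')

def min_count_to_delete_alt (n : Int) (nums : List Int) : Int :=
  let s := PySem.List.sorted nums (fun x => x) false
  let st := s.foldl bStep (0, (none : Option Int), 0, 0)
  n - st.1

-- ===== PRECONDITION & SPEC =====
def Spec_min_count_to_delete (n : Int) (nums : List Int) (out : Int) : Prop := out = min_count_to_delete_alt n nums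
instance (n : Int) (nums : List Int) (out : Int) : Decidable (Spec_min_count_to_delete n nums out) := by unfold Spec_min_count_to_delete; infer_instance

-- ===== CLAIM (what is proved, stated in full; the proofs are below) =====
def Claim_equal_min_count_to_delete : Prop := ∀ (n : Int) (nums : List Int), Dom_min_count_to_delete n nums → Spec_min_count_to_delete n nums (min_count_to_delete n nums)

-- ===== LEMMAS AND PROOFS =====

-- integer-valued count
def cnt (v : Int) (l : List Int) : Int := (List.count v l : Int)

-- A's candidate at value v: count v + count (v+1)   (count of an absent value is 0)
def pvG (nums : List Int) (v : Int) : Int := cnt (v + 1) nums + cnt v nums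

-- B's candidate at value x: count (x-1) + count x
def gp (l : List Int) (x : Int) : Int := cnt (x - 1) l + cnt x l

-- running max of g over a list, starting at 0
def Fm (g : Int → Int) (l : List Int) : Int := l.foldl (fun a x => max a (g x)) 0

theorem cnt_nonneg (v : Int) (l : List Int) : 0 ≤ cnt v l := by
  simp [cnt]

theorem cnt_concat (a x : Int) (l : List Int) :
    cnt a (l ++ [x]) = cnt a l + (if x = a then 1 else 0) := by
  simp [cnt, List.count_append]
  split_ifs with h <;> simp [h]

theorem cnt_eq_zero {a : Int} {l : List Int} (h : a ∉ l) : cnt a l = 0 := by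
  simp [cnt, List.count_eq_zero.mpr h]

theorem pvFoldlMax_init_le (g : Int → Int) (l : List Int) :
    ∀ a : Int, a ≤ l.foldl (fun b x => max b (g x)) a := by
  induction l with
  | nil => intro a; simp
  | cons y t ih =>
    intro a
    exact le_trans (le_max_left a (g y)) (ih _)

theorem pvFoldlMax_mem {g : Int → Int} {l : List Int} {x : Int} (hx : x ∈ l) :
    ∀ a : Int, g x ≤ l.foldl (fun b x => max b (g x)) a := by
  induction l with
  | nil => simp at hx
  | cons y t ih =>
    intro a
    rcases List.mem_cons.mp hx with rfl | hx'
    · exact le_trans (le_max_right a (g x)) (pvFoldlMax_init_le g t _)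
    · exact ih hx' _

theorem pvFoldlMax_le {g : Int → Int} {l : List Int} {m : Int}
    (h : ∀ x ∈ l, g x ≤ m) : ∀ a : Int, a ≤ m → l.foldl (fun b x => max b (g x)) a ≤ m := by
  induction l with
  | nil => intro a ha; simpa using ha
  | cons y t ih =>
    intro a ha
    exact ih (fun x hx => h x (List.mem_cons_of_mem _ hx))
      _ (max_le ha (h y (List.mem_cons_self)))

theorem Fm_nonneg (g : Int → Int) (l : List Int) : 0 ≤ Fm g l :=
  pvFoldlMax_init_le g l 0

theorem le_Fm {g : Int → Int} {l : List Int} {x : Int} (hx : x ∈ l) : g x ≤ Fm g l :=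
  pvFoldlMax_mem hx 0

theorem Fm_le {g : Int → Int} {l : List Int} {m : Int}
    (h0 : 0 ≤ m) (h : ∀ x ∈ l, g x ≤ m) : Fm g l ≤ m :=
  pvFoldlMax_le h 0 h0

theorem Fm_concat (g : Int → Int) (l : List Int) (x : Int) :
    Fm g (l ++ [x]) = max (Fm g l) (g x) := by
  simp [Fm, List.foldl_append]

-- appending a max element changes the candidate max by exactly the new element's candidate
theorem gp_concat_key (l : List Int) (x : Int) (hle : ∀ w ∈ l, w ≤ x) :
    Fm (gp (l ++ [x])) (l ++ [x]) = max (Fm (gp l) l) (gp (l ++ [x]) x) := by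
  rw [Fm_concat]
  have hmono : ∀ w ∈ l, gp l w ≤ gp (l ++ [x]) w := by
    intro w _
    simp only [gp, cnt_concat]
    have := cnt_nonneg w l; have := cnt_nonneg (w-1) l
    split_ifs <;> omega
  have heq : ∀ w ∈ l, w ≠ x → gp (l ++ [x]) w = gp l w := by
    intro w hw hne
    have hwx := hle w hw
    simp only [gp, cnt_concat]
    rw [if_neg (by omega), if_neg (by omega)]
    omega
  apply le_antisymm
  · apply max_le _ (le_max_right _ _)
    apply Fm_le (le_trans (Fm_nonneg _ _) (le_max_left _ _))
    intro w hw
    by_cases hwx : w = x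
    · subst hwx; exact le_max_right _ _
    · rw [heq w hw hwx]
      exact le_trans (le_Fm hw) (le_max_left _ _)
  · apply max_le _ (le_max_right _ _)
    refine le_trans ?_ (le_max_left _ (gp (l ++ [x]) x))
    apply Fm_le (Fm_nonneg _ _)
    intro w hw
    exact le_trans (hmono w hw) (le_Fm hw)

-- in an ascending list, every element is ≤ the last one
theorem pvAllLe {l : List Int} {v : Int} (hs : l.Pairwise (· ≤ ·)) (hL : l.getLast? = some v) :
    ∀ w ∈ l, w ≤ v := by
  induction l with
  | nil => simp at hL
  | cons a t ih =>
    rcases t with _ | ⟨b, t'⟩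
    · simp at hL; subst hL
      intro w hw; simp at hw; omega
    · have hL' : (b :: t').getLast? = some v := by rwa [List.getLast?_cons_cons] at hL
      have hs' := List.pairwise_cons.mp hs
      intro w hw
      rcases List.mem_cons.mp hw with rfl | hw'
      · exact hs'.1 v (List.mem_of_getLast? hL')
      · exact ih hs'.2 hL' w hw'

-- loop invariant of B's streaming pass over an ascending list
theorem bInv (s : List Int) (hs : s.Pairwise (· ≤ ·)) :
    s.foldl bStep (0, (none : Option Int), 0, 0) =
      (Fm (gp s) s, s.getLast?,
       (match s.getLast? with | none => 0 | some v => cnt v s),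
       (match s.getLast? with | none => 0 | some v => cnt (v - 1) s)) := by
  induction s using List.reverseRecOn with
  | nil => simp [Fm]
  | append_singleton l x ih =>
    have hp := List.pairwise_append.mp hs
    have hl : l.Pairwise (· ≤ ·) := hp.1
    have hle : ∀ w ∈ l, w ≤ x := fun w hw => hp.2.2 w hw x (List.mem_singleton_self x)
    rw [List.foldl_append, ih hl]
    simp only [List.foldl_cons, List.foldl_nil]
    have hkey := gp_concat_key l x hle
    rw [List.getLast?_concat]
    rcases hL : l.getLast? with _ | v
    · have hnil : l = [] := List.getLast?_eq_none_iff.mp hL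
      subst hnil
      have h1 : cnt x [x] = 1 := by simp [cnt]
      have h0 : cnt (x - 1) [x] = 0 := cnt_eq_zero (by simp)
      simp only [List.nil_append]
      simp [bStep, Fm, gp, h1, h0]
    · have hall : ∀ w ∈ l, w ≤ v := pvAllLe hl hL
      have hvm : v ∈ l := List.mem_of_getLast? hL
      have hvx : v ≤ x := hle v hvm
      by_cases hx : x = v
      · -- continuing the current run
        subst hx
        have hb : bStep (Fm (gp l) l, some x, cnt x l, cnt (x - 1) l) x
            = (max (Fm (gp l) l) (cnt x l + 1 + cnt (x - 1) l), some x, cnt x l + 1, cnt (x - 1) l) := by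
          simp [bStep]
        rw [hb, hkey]
        have hc1 : cnt x (l ++ [x]) = cnt x l + 1 := by rw [cnt_concat]; simp
        have hc0 : cnt (x - 1) (l ++ [x]) = cnt (x - 1) l := by
          rw [cnt_concat, if_neg (by omega)]; omega
        have hg : gp (l ++ [x]) x = cnt x l + 1 + cnt (x - 1) l := by
          simp [gp, hc1, hc0]; omega
        simp [hg, hc1, hc0]
      · -- a new run starts
        have hvlt : v < x := lt_of_le_of_ne hvx (fun h => hx h.symm)
        have hxnl : x ∉ l := fun hxm => absurd (hall x hxm) (by omega)
        have hcx : cnt x (l ++ [x]) = 1 := by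
          rw [cnt_concat, cnt_eq_zero hxnl]; simp
        by_cases hadj : x = v + 1
        · -- adjacent to the previous run
          have hb : bStep (Fm (gp l) l, some v, cnt v l, cnt (v - 1) l) x
              = (max (Fm (gp l) l) (1 + cnt v l), some x, 1, cnt v l) := by
            simp only [bStep]
            rw [if_neg (by simp; omega), if_pos (by simp; omega)]
          rw [hb, hkey]
          have hc1 : cnt (x - 1) (l ++ [x]) = cnt v l := by
            rw [cnt_concat, if_neg (by omega)]
            have : x - 1 = v := by omega
            rw [this]; omega
          have hg : gp (l ++ [x]) x = 1 + cnt v l := by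
            simp [gp, hc1, hcx]; omega
          simp [hg, hcx, hc1]
        · -- gap: previous run does not count
          have hx1nl : x - 1 ∉ l := fun hm => absurd (hall _ hm) (by omega)
          have hb : bStep (Fm (gp l) l, some v, cnt v l, cnt (v - 1) l) x
              = (max (Fm (gp l) l) (1 + 0), some x, 1, 0) := by
            simp only [bStep]
            rw [if_neg (by simp; omega), if_neg (by simp; omega)]
        
          rw [hb, hkey]
          have hc0 : cnt (x - 1) (l ++ [x]) = 0 := by
            rw [cnt_concat, if_neg (by omega), cnt_eq_zero hx1nl]
            omega
          have hg : gp (l ++ [x]) x = 1 + 0 := by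
            simp [gp, hc0, hcx]
          simp [hg, hcx, hc0]

-- A's value as a max over the distinct values
theorem pvA_eq (n : Int) (nums : List Int) :
    min_count_to_delete n nums = n - Fm (pvG nums) (PySem.Set.ofList nums) := by
  simp only [min_count_to_delete, Fm]
  rw [← PySem.Dict.counter_eq_foldl, PySem.Dict.items_counter, List.foldl_map]
  congr 1
  apply PySem.List.foldl_congr_mem
  intro a k _
  simp only [PySem.Dict.contains_counter, PySem.Dict.getD_counter]
  by_cases h : (k + 1) ∈ nums
  · simp [h, pvG, cnt, Int.add_comm]
  · have hc : List.count (k + 1) nums = 0 := List.count_eq_zero.mpr h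
    simp [h, pvG, cnt, hc]

-- the two maxima agree: candidates c(v)+c(v+1) occur on both sides, singletons are dominated
theorem pvMax_eq (nums : List Int) (s : List Int) (hperm : s.Perm nums) :
    Fm (pvG nums) (PySem.Set.ofList nums) = Fm (gp s) s := by
  have hg : gp s = gp nums := by
    funext w
    simp [gp, cnt, hperm.count_eq]
  rw [hg]
  have hmem : ∀ w, w ∈ s ↔ w ∈ nums := fun w => hperm.mem_iff
  apply le_antisymm
  · apply Fm_le (Fm_nonneg _ _)
    intro v hv
    have hvn : v ∈ nums := (PySem.Set.mem_ofList nums v).mp hv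
    by_cases h : (v + 1) ∈ nums
    · have : gp nums (v + 1) = pvG nums v := by
        simp [gp, pvG]; omega
      rw [← this]
      exact le_Fm ((hmem (v + 1)).mpr h)
    · have hc : cnt (v + 1) nums = 0 := cnt_eq_zero h
      have h1 : pvG nums v ≤ gp nums v := by
        have := cnt_nonneg (v - 1) nums
        simp [pvG, gp, hc]; omega
      exact le_trans h1 (le_Fm ((hmem v).mpr hvn))
  · apply Fm_le (Fm_nonneg _ _)
    intro x hx
    have hxn : x ∈ nums := (hmem x).mp hx
    by_cases h : (x - 1) ∈ nums
    · have : pvG nums (x - 1) = gp nums x := by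
        simp [pvG, gp]; omega
      rw [← this]
      exact le_Fm ((PySem.Set.mem_ofList nums (x - 1)).mpr h)
    · have hc : cnt (x - 1) nums = 0 := cnt_eq_zero h
      have h1 : gp nums x ≤ pvG nums x := by
        have := cnt_nonneg (x + 1) nums
        simp [pvG, gp, hc]; omega
      exact le_trans h1 (le_Fm ((PySem.Set.mem_ofList nums x).mpr hxn))

theorem pvB_eq (n : Int) (nums : List Int) :
    min_count_to_delete_alt n nums
      = n - Fm (gp (PySem.List.sorted nums (fun x => x) false)) (PySem.List.sorted nums (fun x => x) false) := by
  simp only [min_count_to_delete_alt]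
  rw [bInv _ (PySem.List.sorted_pairwise nums (fun x => x))]

-- ===== VERDICT (by name: the statement is the Claim_ definition above) =====
theorem min_count_to_delete_spec : Claim_equal_min_count_to_delete := by
  intro n nums _
  unfold Spec_min_count_to_delete
  rw [pvA_eq, pvB_eq,
    pvMax_eq nums _ (PySem.List.sorted_perm nums (fun x => x) false)]
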